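-- pv_equiv track=rewrite | github.com/FatimaJahara/PRIME | evaluation/eval.py | row_ordering
-- ===== SOURCE A (Python) =====
-- import itertools
--
-- def row_ordering(solution):
--
--     # Generate all permutations of person keys
--     people = list(solution.keys())
--     permutations = list(itertools.permutations(people))
--
--     # Create list of swapped solutions
--     swapped_versions = []
--     for perm in permutations:
--         reordered = {name: solution[name] for name in perm}
--         swapped_versions.append(reordered)
--
--     return swapped_versions
-- ===== SOURCE B (Python) =====
-- def _selections(xs):
--     # all ways to pick one element, paired with the rest in original order
--     if not xs:
--         return []
--     x, rest = xs[0], xs[1:]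
--     return [(x, rest)] + [(k, [x] + r) for (k, r) in _selections(rest)]
--
--
-- def row_ordering(solution):
--     # recursive generator over the key list: pick each remaining key in turn,
--     # extending an accumulated prefix of (key, value) pairs; emit a dict per leaf
--     def go(remaining, prefix):
--         if not remaining:
--             return [dict(prefix)]
--         out = []
--         for k, rest in _selections(remaining):
--             out.extend(go(rest, prefix + [(k, solution[k])]))
--         return out
--
--     return go(list(solution.keys()), [])
-- ===== Notes on version B (the rewrite author's own statement) =====
-- stated objective: alternative
-- what changed: Replaces the itertools.permutations call plus a second dict-building loop with a single recursive generator that picks each remaining key in turn and emits each reordered dict directly from an accumulated prefix.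
import Mathlib
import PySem

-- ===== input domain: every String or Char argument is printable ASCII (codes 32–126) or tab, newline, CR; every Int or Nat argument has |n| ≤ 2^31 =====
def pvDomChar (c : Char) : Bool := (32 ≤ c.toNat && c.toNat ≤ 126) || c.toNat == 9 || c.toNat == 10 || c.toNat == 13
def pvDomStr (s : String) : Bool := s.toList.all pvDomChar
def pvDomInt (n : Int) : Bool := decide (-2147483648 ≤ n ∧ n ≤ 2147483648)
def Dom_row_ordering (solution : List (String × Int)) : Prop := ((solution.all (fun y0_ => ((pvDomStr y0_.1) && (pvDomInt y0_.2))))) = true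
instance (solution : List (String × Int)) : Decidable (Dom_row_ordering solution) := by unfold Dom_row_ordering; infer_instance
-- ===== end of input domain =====

-- B replaces the permutations-library call + second dict-building loop with one recursive
-- generator emitting the reordered dicts directly (alternative decomposition, same cost).

-- ===== PORT A =====
def row_ordering (solution : List (String × Int)) : List (List (String × Int)) :=
  let d := PySem.Dict.ofList solution
  let people := d.keys
  let permutations := PySem.List.permutations people people.length
  permutations.foldl
    (fun acc perm => acc ++ [perm.map (fun name => (name, d.getD name 0))]) []

-- ===== PORT B =====
def pvSelections (xs : List String) : List (String × List String) :=
  match xs with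
  | [] => []
  | x :: rest => (x, rest) :: (pvSelections rest).map (fun p => (p.1, x :: p.2))

-- fuel = remaining.length on every call; mirrors Source B's naturally terminating recursion
def pvGo (d : PySem.Dict String Int) : Nat → List String → List (String × Int) → List (List (String × Int))
  | 0, _, pref => [pref]
  | n + 1, rem, pref =>
      (pvSelections rem).flatMap (fun p => pvGo d n p.2 (pref ++ [(p.1, d.getD p.1 0)]))

def row_ordering_alt (solution : List (String × Int)) : List (List (String × Int)) :=
  let d := PySem.Dict.ofList solution
  let keys := d.keys
  pvGo d keys.length keys []

-- ===== PRECONDITION & SPEC =====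
def Spec_row_ordering (solution : List (String × Int)) (out : List (List (String × Int))) : Prop := out = row_ordering_alt solution
instance (solution : List (String × Int)) (out : List (List (String × Int))) : Decidable (Spec_row_ordering solution out) := by unfold Spec_row_ordering; infer_instance

-- ===== CLAIM (what is proved, stated in full; the proofs are below) =====
def Claim_equal_row_ordering : Prop := ∀ (solution : List (String × Int)), Dom_row_ordering solution → Spec_row_ordering solution (row_ordering solution)

-- ===== LEMMAS AND PROOFS =====

-- A's indexed flatMap over range/eraseIdx is B's flatMap over pvSelections
theorem pvSelections_flatMap {β : Type} (xs : List String) (g : String → List String → List β) :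
    (List.range xs.length).flatMap (fun i => g (xs.getD i "") (xs.eraseIdx i))
    = (pvSelections xs).flatMap (fun p => g p.1 p.2) := by
  induction xs generalizing g with
  | nil => simp [pvSelections]
  | cons x rest ih =>
      simp only [pvSelections, List.length_cons, List.range_succ_eq_map,
        List.flatMap_cons, List.flatMap_map, List.getD_cons_zero, List.getD_cons_succ,
        List.eraseIdx_cons_zero, List.eraseIdx_cons_succ]
      rw [ih (fun a r => g a (x :: r))]

theorem pvGo_eq (d : PySem.Dict String Int) (n : Nat) :
    ∀ (rem : List String) (pref : List (String × Int)),
    pvGo d n rem pref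
      = (PySem.List.permutations rem n).map
          (fun p => pref ++ p.map (fun k => (k, d.getD k 0))) := by
  induction n with
  | zero => intro rem pref; simp [pvGo, PySem.List.permutations]
  | succ n ih =>
      intro rem pref
      have hsel : PySem.List.permutations rem (n + 1)
          = (pvSelections rem).flatMap
              (fun p => (PySem.List.permutations p.2 n).map (fun q => p.1 :: q)) := by
        rw [PySem.List.permutations_succ,
          ← pvSelections_flatMap rem
            (fun a r => (PySem.List.permutations r n).map (fun q => a :: q))]
        apply List.flatMap_congr
        intro i hi
        have hlt : i < rem.length := List.mem_range.mp hi
        have hsome : rem[i]? = some rem[i] := List.getElem?_eq_getElem hlt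
        simp [hsome, List.getD]
      rw [hsel, List.map_flatMap]
      simp only [pvGo]
      congr 1
      funext p
      rw [ih]
      simp [List.map_map, Function.comp, List.append_assoc]

-- ===== VERDICT (by name: the statement is the Claim_ definition above) =====
theorem row_ordering_spec : Claim_equal_row_ordering := by
  intro solution _
  unfold Spec_row_ordering row_ordering row_ordering_alt
  simp only []
  rw [PySem.List.foldl_append_singleton_eq_map, pvGo_eq]
  simp
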